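-- pv_equiv track=rewrite | github.com/JoshDiDuca/cola-coder | src/cola_coder/features/syntax_error_classifier.py | _check_unmatched_brackets
-- ===== SOURCE A (Python) =====
-- from typing import Optional
--
-- _BRACKET_PAIRS = {"(": ")", "[": "]", "{": "}"}
--
-- _CLOSE_TO_OPEN = {v: k for k, v in _BRACKET_PAIRS.items()}
--
-- def _check_unmatched_brackets(code: str) -> Optional[str]:
--     """Return an error message if brackets are unmatched, else None."""
--     stack = []
--     in_str = False
--     str_char = ""
--     for i, ch in enumerate(code):
--         if in_str:
--             if ch == str_char and (i == 0 or code[i - 1] != "\\"):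
--                 in_str = False
--             continue
--         if ch in ("'", '"'):
--             in_str = True
--             str_char = ch
--             continue
--         if ch in _BRACKET_PAIRS:
--             stack.append(ch)
--         elif ch in _CLOSE_TO_OPEN:
--             if not stack or stack[-1] != _CLOSE_TO_OPEN[ch]:
--                 return f"Unexpected '{ch}' — no matching '{_CLOSE_TO_OPEN[ch]}'"
--             stack.pop()
--     if stack:
--         return f"Unclosed '{stack[-1]}'"
--     return None
-- ===== SOURCE B (Python) =====
-- def _check_unmatched_brackets(code):
--     """Return an error message if brackets are unmatched, else None."""
--     pairs = {"(": ")", "[": "]", "{": "}"}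
--     close_to_open = {")": "(", "]": "[", "}": "{"}
--     # Pass 1: strip string-literal contents (same escape rule: only the
--     # immediately preceding character is checked).
--     cleaned = []
--     in_str = False
--     str_char = ""
--     prev = ""
--     for ch in code:
--         if in_str:
--             if ch == str_char and prev != "\\":
--                 in_str = False
--         elif ch in ("'", '"'):
--             in_str = True
--             str_char = ch
--         else:
--             cleaned.append(ch)
--         prev = ch
--     # Pass 2: plain bracket stack over the cleaned code.
--     stack = []
--     for ch in cleaned:
--         if ch in pairs:
--             stack.append(ch)
--         elif ch in close_to_open:
--             o = close_to_open[ch]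
--             if not stack or stack[-1] != o:
--                 return f"Unexpected '{ch}' — no matching '{o}'"
--             stack.pop()
--     if stack:
--         return f"Unclosed '{stack[-1]}'"
--     return None
-- ===== Notes on version B (the rewrite author's own statement) =====
-- stated objective: simpler
-- what changed: A's single loop interleaving the string-literal state machine with the bracket stack is split into two sequential passes: pass 1 strips string-literal contents (same escape rule), pass 2 runs a plain bracket-stack scan over the cleaned characters.
import Mathlib
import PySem

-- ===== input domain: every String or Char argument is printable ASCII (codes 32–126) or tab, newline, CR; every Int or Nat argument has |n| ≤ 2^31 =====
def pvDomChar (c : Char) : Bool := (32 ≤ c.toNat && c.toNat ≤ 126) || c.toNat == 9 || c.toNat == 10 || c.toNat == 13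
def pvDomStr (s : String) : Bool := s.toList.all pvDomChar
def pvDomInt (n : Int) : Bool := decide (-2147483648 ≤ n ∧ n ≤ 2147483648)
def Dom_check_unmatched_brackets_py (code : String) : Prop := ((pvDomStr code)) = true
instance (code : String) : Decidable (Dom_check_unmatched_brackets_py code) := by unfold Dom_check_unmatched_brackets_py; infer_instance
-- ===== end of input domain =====

-- B replaces A's single interleaved loop by two sequential passes (strip string
-- literals, then a plain bracket-stack scan); objective: simpler decomposition.

-- ===== PORT A =====
-- shared literal constants of the module: _CLOSE_TO_OPEN lookup and the two messages
def pvCloseToOpen (ch : Char) : Option Char :=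
  if ch = ')' then some '(' else if ch = ']' then some '[' else if ch = '}' then some '{' else none

def pvUnexpectedMsg (ch o : Char) : String :=
  "Unexpected '" ++ String.mk [ch] ++ "' — no matching '" ++ String.mk [o] ++ "'"

def pvUnclosedMsg (top : Char) : String := "Unclosed '" ++ String.mk [top] ++ "'"

-- `prev = none` plays the role of Python's `i == 0`; the escape test checks only the previous char
def pvPrevOk (prev : Option Char) : Bool :=
  match prev with
  | none => true
  | some p => p ≠ '\\'

-- A's loop, step for step: one pass carrying (in_str, str_char, stack); stack head = top.
-- Python's initial str_char is the (never read before assignment) string ""; we pass ' '.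
def pvALoop (cs : List Char) (prev : Option Char) (in_str : Bool) (str_char : Char)
    (stack : List Char) : Option String :=
  match cs with
  | [] =>
    match stack with
    | [] => none
    | top :: _ => some (pvUnclosedMsg top)
  | ch :: rest =>
    if in_str then
      if ch = str_char ∧ pvPrevOk prev then pvALoop rest (some ch) false str_char stack
      else pvALoop rest (some ch) true str_char stack
    else if ch = '\'' ∨ ch = '"' then pvALoop rest (some ch) true ch stack
    else if ch = '(' ∨ ch = '[' ∨ ch = '{' then pvALoop rest (some ch) in_str str_char (ch :: stack)
    else
      match pvCloseToOpen ch with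
      | some o =>
        match stack with
        | [] => some (pvUnexpectedMsg ch o)
        | top :: stk =>
          if top ≠ o then some (pvUnexpectedMsg ch o)
          else pvALoop rest (some ch) in_str str_char stk
      | none => pvALoop rest (some ch) in_str str_char stack

def check_unmatched_brackets_py (code : String) : Option String :=
  pvALoop code.toList none false ' ' []

-- ===== PORT B =====
-- pass 1: drop string-literal contents and quotes, keep every other char
def pvStrip (cs : List Char) (prev : Option Char) (in_str : Bool) (str_char : Char) : List Char :=
  match cs with
  | [] => []
  | ch :: rest =>
    if in_str then
      if ch = str_char ∧ pvPrevOk prev then pvStrip rest (some ch) false str_char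
      else pvStrip rest (some ch) true str_char
    else if ch = '\'' ∨ ch = '"' then pvStrip rest (some ch) true ch
    else ch :: pvStrip rest (some ch) in_str str_char

-- pass 2: plain bracket stack over the cleaned characters
def pvScan (cs : List Char) (stack : List Char) : Option String :=
  match cs with
  | [] =>
    match stack with
    | [] => none
    | top :: _ => some (pvUnclosedMsg top)
  | ch :: rest =>
    if ch = '(' ∨ ch = '[' ∨ ch = '{' then pvScan rest (ch :: stack)
    else
      match pvCloseToOpen ch with
      | some o =>
        match stack with
        | [] => some (pvUnexpectedMsg ch o)
        | top :: stk =>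
          if top ≠ o then some (pvUnexpectedMsg ch o)
          else pvScan rest stk
      | none => pvScan rest stack

def check_unmatched_brackets_py_alt (code : String) : Option String :=
  pvScan (pvStrip code.toList none false ' ') []

-- ===== PRECONDITION & SPEC =====
def Spec_check_unmatched_brackets_py (code : String) (out : Option String) : Prop := out = check_unmatched_brackets_py_alt code
instance (code : String) (out : Option String) : Decidable (Spec_check_unmatched_brackets_py code out) := by unfold Spec_check_unmatched_brackets_py; infer_instance

-- ===== CLAIM (what is proved, stated in full; the proofs are below) =====
def Claim_equal_check_unmatched_brackets_py : Prop := ∀ (code : String), Dom_check_unmatched_brackets_py code → Spec_check_unmatched_brackets_py code (check_unmatched_brackets_py code)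

-- ===== LEMMAS AND PROOFS =====

-- the fused loop equals the scan of the stripped suffix, for every intermediate state
theorem pvALoop_eq_scan_strip (cs : List Char) :
    ∀ (prev : Option Char) (ins : Bool) (sc : Char) (stack : List Char),
      pvALoop cs prev ins sc stack = pvScan (pvStrip cs prev ins sc) stack := by
  induction cs with
  | nil => intro prev ins sc stack; rfl
  | cons ch rest ih =>
    intro prev ins sc stack
    by_cases hins : ins
    · subst hins
      by_cases hcl : ch = sc ∧ pvPrevOk prev
      · simp [pvALoop, pvStrip, hcl, ih]
      · simp [pvALoop, pvStrip, hcl, ih]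
    · simp only [Bool.not_eq_true] at hins; subst hins
      by_cases hq : ch = '\'' ∨ ch = '"'
      · simp [pvALoop, pvStrip, hq, ih]
      · by_cases hop : ch = '(' ∨ ch = '[' ∨ ch = '{'
        · simp [pvALoop, pvStrip, pvScan, hq, hop, ih]
        · cases hco : pvCloseToOpen ch with
          | none => simp [pvALoop, pvStrip, pvScan, hq, hop, hco, ih]
          | some o =>
            cases stack with
            | nil => simp [pvALoop, pvStrip, pvScan, hq, hop, hco]
            | cons top stk =>
              by_cases htop : top = o
              · simp [pvALoop, pvStrip, pvScan, hq, hop, hco, htop, ih]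
              · simp [pvALoop, pvStrip, pvScan, hq, hop, hco, htop]

-- ===== VERDICT (by name: the statement is the Claim_ definition above) =====
theorem check_unmatched_brackets_py_spec : Claim_equal_check_unmatched_brackets_py := by
  intro code _
  unfold Spec_check_unmatched_brackets_py check_unmatched_brackets_py check_unmatched_brackets_py_alt
  exact pvALoop_eq_scan_strip _ _ _ _ _
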